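-- pv_equiv track=rewrite | github.com/ndea/deepscaler | scripts/data/arc_reward_model.py | grid_from_str
-- ===== SOURCE A (Python) =====
-- def grid_from_str(s: str) -> list[list[int]]:
--     """
--     Extract a grid (2D list of integers) from a string.
--
--     Args:
--         s: String possibly containing a grid
--
--     Returns:
--         A 2D list of integers representing the grid
--     """
--
--     def is_int(token: str) -> bool:
--         try:
--             int(token)
--             return True
--         except ValueError:
--             return False
--
--     lines = s.splitlines()
--     final_grid = []
--     current_grid = []
--
--     for line in lines:
--         tokens = line.split()
--         if tokens and all(is_int(token) for token in tokens):
--             current_grid.append([int(token) for token in tokens])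
--         else:
--             if current_grid:
--                 final_grid = current_grid
--                 current_grid = []
--
--     if current_grid:
--         final_grid = current_grid
--
--     return final_grid
-- ===== SOURCE B (Python) =====
-- def grid_from_str(s: str) -> list[list[int]]:
--     """Extract the last contiguous integer-grid block from a string.
--
--     Scans the lines from the END: skips trailing non-grid lines, then
--     collects grid rows upward until the block ends, and reverses.
--     """
--
--     def parse_row(line):
--         tokens = line.split()
--         if not tokens:
--             return None
--         try:
--             return [int(t) for t in tokens]
--         except ValueError:
--             return None
--
--     rows = []
--     for line in reversed(s.splitlines()):
--         row = parse_row(line)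
--         if row is not None:
--             rows.append(row)
--         elif rows:
--             break
--     rows.reverse()
--     return rows
-- ===== Notes on version B (the rewrite author's own statement) =====
-- stated objective: alternative
-- what changed: Replaces A's forward scan with a final/current accumulator pair by a reverse traversal of the lines that skips trailing non-grid lines, collects the last run of integer rows and stops at its start, then reverses.
import Mathlib
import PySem

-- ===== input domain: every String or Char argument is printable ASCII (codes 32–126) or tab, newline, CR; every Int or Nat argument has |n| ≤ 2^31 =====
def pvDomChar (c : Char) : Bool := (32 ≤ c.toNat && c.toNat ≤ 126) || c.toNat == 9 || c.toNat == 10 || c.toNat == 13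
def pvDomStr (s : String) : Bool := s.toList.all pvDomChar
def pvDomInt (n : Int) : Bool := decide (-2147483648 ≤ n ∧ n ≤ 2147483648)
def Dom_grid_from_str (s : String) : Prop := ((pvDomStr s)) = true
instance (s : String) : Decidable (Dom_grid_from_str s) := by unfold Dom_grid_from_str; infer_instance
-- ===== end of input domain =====

-- B is an alternative implementation: it scans the lines from the end instead of
-- keeping A's forward final/current accumulator pair.

-- ===== PORT A =====
-- is_int(token)
def pvIsIntA (t : String) : Bool := (PySem.Int.ofStr? t).isSome

-- loop body: state (final_grid, current_grid), one line
def pvStepA (st : List (List Int) × List (List Int)) (line : String) :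
    List (List Int) × List (List Int) :=
  let tokens := PySem.Str.split₀ line
  if !tokens.isEmpty && tokens.all pvIsIntA then
    (st.1, st.2 ++ [tokens.map (fun t => (PySem.Int.ofStr? t).getD 0)])
  else
    if !st.2.isEmpty then (st.2, []) else (st.1, [])

def grid_from_str (s : String) : List (List Int) :=
  let lines := PySem.Str.splitlines s
  let r := lines.foldl pvStepA ([], [])
  if !r.2.isEmpty then r.2 else r.1

-- ===== PORT B =====
-- parse_row(line): the row as ints, or none if the line is not a pure integer row
def pvRowB (line : String) : Option (List Int) :=
  let tokens := PySem.Str.split₀ line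
  if tokens.isEmpty then none
  else if tokens.all (fun t => (PySem.Int.ofStr? t).isSome) then
    some (tokens.map (fun t => (PySem.Int.ofStr? t).getD 0))
  else none

-- the 'for line in reversed(lines)' loop with its break
def pvScanB : List String → List (List Int) → List (List Int)
  | [], rows => rows
  | l :: rest, rows =>
    match pvRowB l with
    | some row => pvScanB rest (rows ++ [row])
    | none => if !rows.isEmpty then rows else pvScanB rest rows

def grid_from_str_alt (s : String) : List (List Int) :=
  (pvScanB (PySem.Str.splitlines s).reverse []).reverse

-- ===== PRECONDITION & SPEC =====
def Spec_grid_from_str (s : String) (out : List (List Int)) : Prop := out = grid_from_str_alt s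
instance (s : String) (out : List (List Int)) : Decidable (Spec_grid_from_str s out) := by unfold Spec_grid_from_str; infer_instance

-- ===== CLAIM (what is proved, stated in full; the proofs are below) =====
def Claim_equal_grid_from_str : Prop := ∀ (s : String), Dom_grid_from_str s → Spec_grid_from_str s (grid_from_str s)

-- ===== LEMMAS AND PROOFS =====

-- pvScanB from a nonempty accumulator just extends it with the leading run of int rows
lemma pvScanB_ne (rev : List String) (acc : List (List Int)) (h : acc ≠ []) :
    pvScanB rev acc
      = acc ++ (rev.takeWhile fun l => (pvRowB l).isSome).map (fun l => (pvRowB l).getD []) := by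
  induction rev generalizing acc with
  | nil => simp [pvScanB]
  | cons l rest ih =>
    cases hr : pvRowB l with
    | none => simp [pvScanB, hr, h]
    | some row =>
      have : acc ++ [row] ≠ [] := by simp
      simp [pvScanB, hr, ih _ this]

-- pvScanB from the empty accumulator: skip the non-int prefix, take the next run
lemma pvScanB_nil (rev : List String) :
    pvScanB rev []
      = ((rev.dropWhile fun l => !(pvRowB l).isSome).takeWhile fun l => (pvRowB l).isSome).map
          (fun l => (pvRowB l).getD []) := by
  induction rev with
  | nil => simp [pvScanB]
  | cons l rest ih =>
    cases hr : pvRowB l with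
    | none => simp [pvScanB, hr, ih]
    | some row =>
      have hne : ([row] : List (List Int)) ≠ [] := by simp
      simp [pvScanB, hr, pvScanB_ne rest [row] hne]

-- A's condition on a line is exactly (pvRowB line).isSome
lemma condA_iff (line : String) :
    (!(PySem.Str.split₀ line).isEmpty && (PySem.Str.split₀ line).all pvIsIntA) = (pvRowB line).isSome := by
  unfold pvRowB
  cases h1 : (PySem.Str.split₀ line).isEmpty with
  | true => simp [h1]
  | false =>
    cases h2 : (PySem.Str.split₀ line).all (fun t => (PySem.Int.ofStr? t).isSome) with
    | true =>
      simp [pvIsIntA, h1, h2]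
      simpa using h2
    | false =>
      simp [pvIsIntA, h1, h2]
      simpa using h2

-- ... and the parsed row A builds is the row pvRowB returns
lemma rowA_eq (line : String) (h : (pvRowB line).isSome) :
    (PySem.Str.split₀ line).map (fun t => (PySem.Int.ofStr? t).getD 0) = (pvRowB line).getD [] := by
  unfold pvRowB at *
  cases h1 : (PySem.Str.split₀ line).isEmpty with
  | true => simp [h1] at h
  | false =>
    cases h2 : (PySem.Str.split₀ line).all (fun t => (PySem.Int.ofStr? t).isSome) with
    | true => simp [h1, h2]
    | false => simp [h1, h2] at h

-- The main invariant of A's left fold, by induction from the right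
lemma foldA_spec (lines : List String) :
    (lines.foldl pvStepA ([], [])).2
      = ((lines.reverse.takeWhile fun l => (pvRowB l).isSome).map (fun l => (pvRowB l).getD [])).reverse
  ∧ (if !(lines.foldl pvStepA ([], [])).2.isEmpty then (lines.foldl pvStepA ([], [])).2
      else (lines.foldl pvStepA ([], [])).1)
      = (((lines.reverse.dropWhile fun l => !(pvRowB l).isSome).takeWhile fun l => (pvRowB l).isSome).map
          (fun l => (pvRowB l).getD [])).reverse := by
  induction lines using List.reverseRecOn with
  | nil => simp
  | append_singleton lines l ih =>
    obtain ⟨ih1, ih2⟩ := ih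
    rw [List.foldl_append, List.foldl_cons, List.foldl_nil]
    have hc := condA_iff l
    cases hr : (pvRowB l).isSome with
    | true =>
      rw [hr] at hc
      have hrow := rowA_eq l hr
      have hnone : pvRowB l ≠ none := Option.isSome_iff_ne_none.mp hr
      constructor
      · simp [pvStepA, hc, hr, ih1, hrow]
      · simp [pvStepA, hc, hr, hnone, ih1, hrow]
    | false =>
      rw [hr] at hc
      have h2' : (pvStepA (lines.foldl pvStepA ([], [])) l).2 = [] := by
        simp only [pvStepA, hc, Bool.false_eq_true, if_false]
        split <;> rfl
      have h1' : (pvStepA (lines.foldl pvStepA ([], [])) l).1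
          = (if !(lines.foldl pvStepA ([], [])).2.isEmpty then (lines.foldl pvStepA ([], [])).2
             else (lines.foldl pvStepA ([], [])).1) := by
        simp only [pvStepA, hc, Bool.false_eq_true, if_false]
        split <;> simp_all
      refine ⟨?_, ?_⟩
      · simp [h2', hr]
      · rw [h2']
        simp only [List.reverse_append, List.reverse_singleton, List.singleton_append,
          List.dropWhile_cons, hr]
        simpa [h1'] using ih2

-- ===== VERDICT (by name: the statement is the Claim_ definition above) =====
theorem grid_from_str_spec : Claim_equal_grid_from_str := by
  intro s _
  unfold Spec_grid_from_str grid_from_str grid_from_str_alt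
  rw [pvScanB_nil]
  exact (foldA_spec (PySem.Str.splitlines s)).2
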